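-- pv_equiv track=rewrite | github.com/python-rstmks/python_cli | unitmain.py | get_avgscore
-- ===== SOURCE A (Python) =====
-- from collections import OrderedDict
--
-- def get_avgscore(player_to_ttlscore: dict[str, dict[int, int]]) -> OrderedDict[int, list[str]]:
--
--     """
--     プレイヤーをキー、値をトータルスコアとする辞書を入力値として
--     平均値をキー、プレイヤーを値とする辞書を返す
--     """
--
--     avgscore_to_player: dict[int, str] = {}
--
--     # for player in player_to_ttlscore:
--     # こっちのほうがキーか値かどちらをループするのかわかりやすい
--     for player in player_to_ttlscore.keys():
--
--
--         if player_to_ttlscore[player]['cnt'] == 0: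
--             # 0除算対策
--             continue
--
--         avg_score: int = int(player_to_ttlscore[player]['total'] / player_to_ttlscore[player]['cnt'])
--
--
--         if avg_score not in avgscore_to_player.keys():
--             avgscore_to_player[avg_score] = [player]
--
--         else:
--             avgscore_to_player[avg_score].append(player)
--
--     return OrderedDict(sorted(avgscore_to_player.items(), reverse=True))
-- ===== SOURCE B (Python) =====
-- from collections import OrderedDict
--
-- def get_avgscore(player_to_ttlscore):
--     """Sort the distinct truncated averages once, then collect each group's
--     players with a per-key scan; no incremental grouping dict."""
--     pairs = [(int(d['total'] / d['cnt']), p)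
--              for p, d in player_to_ttlscore.items() if d['cnt'] != 0]
--     keys = sorted({a for a, _ in pairs}, reverse=True)
--     return OrderedDict((k, [p for a, p in pairs if a == k]) for k in keys)
-- ===== Notes on version B (the rewrite author's own statement) =====
-- stated objective: alternative
-- what changed: B replaces A's incrementally built grouping dict (membership test + append per player, then a final sort of the items) by sorting the distinct truncated averages once and collecting each group's players with a per-key scan of a precomputed (avg, player) pair list.
import Mathlib
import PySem

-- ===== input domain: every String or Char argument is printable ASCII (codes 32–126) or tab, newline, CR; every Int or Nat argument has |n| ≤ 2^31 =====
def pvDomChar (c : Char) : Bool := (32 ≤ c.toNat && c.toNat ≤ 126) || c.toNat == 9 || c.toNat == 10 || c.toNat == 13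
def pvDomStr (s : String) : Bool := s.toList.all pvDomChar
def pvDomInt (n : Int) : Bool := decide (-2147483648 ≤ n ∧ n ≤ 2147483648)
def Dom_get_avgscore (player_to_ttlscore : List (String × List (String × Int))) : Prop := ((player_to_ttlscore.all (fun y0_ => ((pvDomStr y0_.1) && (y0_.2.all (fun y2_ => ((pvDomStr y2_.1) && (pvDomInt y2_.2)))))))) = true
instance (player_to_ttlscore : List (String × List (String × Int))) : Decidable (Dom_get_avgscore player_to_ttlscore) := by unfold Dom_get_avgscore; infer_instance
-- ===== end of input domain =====

-- B sorts the distinct truncated averages once and collects each group by a per-key scan of the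
-- (avg, player) pairs, instead of A's incremental grouping dict that is sorted at the end (objective: alternative).


-- ===== PORT A =====
-- Transliteration of A. Notes on exactness:
-- * `int(total/cnt)` is PySem.Int.truncdiv, exact for |total|,|cnt| < 2^53, hence on Dom (|n| ≤ 2^31).
-- * the final `sorted(items, reverse=True)` compares (int, list) tuples; the dict's keys are unique,
--   so the comparison never goes past the first component and key `·.1` is the same sort.
def get_avgscore (player_to_ttlscore : List (String × List (String × Int))) : List (Int × List String) :=
  let avgscore_to_player : PySem.Dict Int (List String) :=
    player_to_ttlscore.foldl (fun acc pd =>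
      let d := PySem.Dict.mk pd.2
      if d.getD "cnt" 0 = 0 then acc
      else
        let avg_score : Int := PySem.Int.truncdiv (d.getD "total" 0) (d.getD "cnt" 0)
        if acc.contains avg_score = false then acc.insert avg_score [pd.1]
        else acc.insert avg_score (acc.getD avg_score [] ++ [pd.1]))
      PySem.Dict.empty
  PySem.List.sorted avgscore_to_player.items (fun p => p.1) true

-- ===== PORT B =====
def get_avgscore_alt (player_to_ttlscore : List (String × List (String × Int))) : List (Int × List String) :=
  let pairs : List (Int × String) :=
    player_to_ttlscore.filterMap (fun pd =>
      let d := PySem.Dict.mk pd.2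
      if d.getD "cnt" 0 = 0 then none
      else some (PySem.Int.truncdiv (d.getD "total" 0) (d.getD "cnt" 0), pd.1))
  let keys : List Int := PySem.List.sorted (PySem.Set.ofList (pairs.map (·.1))) (fun x => x) true
  keys.map (fun k => (k, (pairs.filter (fun ap => ap.1 == k)).map (·.2)))

-- ===== PRECONDITION & SPEC =====
-- Pre_ excludes (a) inputs on which A raises KeyError (an inner dict missing 'cnt', or missing
-- 'total' while its 'cnt' is non-zero), and (b) assoc lists with duplicate outer player names or
-- duplicate inner keys, which do not represent a Python dict unambiguously (dict construction
-- collapses duplicates, last value winning — a corner of the representation, not of A).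
def Pre_get_avgscore (player_to_ttlscore : List (String × List (String × Int))) : Prop :=
  (player_to_ttlscore.map (·.1)).Nodup ∧
  ∀ pd ∈ player_to_ttlscore,
    (pd.2.map (·.1)).Nodup ∧
    (PySem.Dict.mk pd.2).contains "cnt" = true ∧
    ((PySem.Dict.mk pd.2).getD "cnt" 0 ≠ 0 → (PySem.Dict.mk pd.2).contains "total" = true)
instance (player_to_ttlscore : List (String × List (String × Int))) : Decidable (Pre_get_avgscore player_to_ttlscore) := by unfold Pre_get_avgscore; infer_instance

def pvWitness_get_avgscore : (List (String × List (String × Int))) :=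
  [("ann", [("cnt", 2), ("total", 7)]), ("bob", [("cnt", 0)]), ("cy", [("cnt", 2), ("total", 6)])]

def Spec_get_avgscore (player_to_ttlscore : List (String × List (String × Int))) (out : List (Int × List String)) : Prop := out = get_avgscore_alt player_to_ttlscore
instance (player_to_ttlscore : List (String × List (String × Int))) (out : List (Int × List String)) : Decidable (Spec_get_avgscore player_to_ttlscore out) := by unfold Spec_get_avgscore; infer_instance

-- ===== CLAIM (what is proved, stated in full; the proofs are below) =====
def Claim_equal_get_avgscore : Prop := ∀ (player_to_ttlscore : List (String × List (String × Int))), Dom_get_avgscore player_to_ttlscore → Pre_get_avgscore player_to_ttlscore → Spec_get_avgscore player_to_ttlscore (get_avgscore player_to_ttlscore)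

-- ===== LEMMAS AND PROOFS =====

-- the (avg, player) pairs both programs effectively group
def pvPairs (m : List (String × List (String × Int))) : List (Int × String) :=
  m.filterMap (fun pd =>
    let d := PySem.Dict.mk pd.2
    if d.getD "cnt" 0 = 0 then none
    else some (PySem.Int.truncdiv (d.getD "total" 0) (d.getD "cnt" 0), pd.1))

-- A's loop body is exactly `d[avg] = d.get(avg, []) + [player]` for the entries it keeps
theorem pvFoldA_eq_modify (m : List (String × List (String × Int)))
    (acc : PySem.Dict Int (List String)) :
    m.foldl (fun acc pd =>
      let d := PySem.Dict.mk pd.2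
      if d.getD "cnt" 0 = 0 then acc
      else
        let avg_score : Int := PySem.Int.truncdiv (d.getD "total" 0) (d.getD "cnt" 0)
        if acc.contains avg_score = false then acc.insert avg_score [pd.1]
        else acc.insert avg_score (acc.getD avg_score [] ++ [pd.1])) acc
    = (pvPairs m).foldl (fun d p => d.modify p.1 [] (· ++ [p.2])) acc := by
  induction m generalizing acc with
  | nil => rfl
  | cons pd rest ih =>
    simp only [List.foldl_cons, pvPairs, List.filterMap_cons]
    by_cases h0 : (PySem.Dict.mk pd.2).getD "cnt" 0 = 0
    · simp only [h0, if_true]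
      simpa [pvPairs] using ih acc
    · simp only [h0, if_false]
      rw [List.foldl_cons]
      have hstep :
          (if acc.contains (PySem.Int.truncdiv ((PySem.Dict.mk pd.2).getD "total" 0) ((PySem.Dict.mk pd.2).getD "cnt" 0)) = false
             then acc.insert (PySem.Int.truncdiv ((PySem.Dict.mk pd.2).getD "total" 0) ((PySem.Dict.mk pd.2).getD "cnt" 0)) [pd.1]
             else acc.insert (PySem.Int.truncdiv ((PySem.Dict.mk pd.2).getD "total" 0) ((PySem.Dict.mk pd.2).getD "cnt" 0))
               (acc.getD (PySem.Int.truncdiv ((PySem.Dict.mk pd.2).getD "total" 0) ((PySem.Dict.mk pd.2).getD "cnt" 0)) [] ++ [pd.1]))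
          = acc.modify (PySem.Int.truncdiv ((PySem.Dict.mk pd.2).getD "total" 0) ((PySem.Dict.mk pd.2).getD "cnt" 0)) [] (· ++ [pd.1]) := by
        set k := PySem.Int.truncdiv ((PySem.Dict.mk pd.2).getD "total" 0) ((PySem.Dict.mk pd.2).getD "cnt" 0) with hk
        simp only [PySem.Dict.modify]
        by_cases hc : acc.contains k = true
        · rw [if_neg (by simp [hc])]
        · have hc' : acc.contains k = false := by simpa using hc
          rw [if_pos hc', PySem.Dict.getD_of_not_contains]
          · simp
          · exact hc'
      simp only [hstep]
      simpa [pvPairs] using ih _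

theorem pvGroupFold_getD (l : List (Int × String)) (c : Int) :
    ((l.foldl (fun d p => d.modify p.1 [] (· ++ [p.2])) (PySem.Dict.empty : PySem.Dict Int (List String))).getD c [])
      = (l.filter (fun p => p.1 == c)).map (·.2) := by
  simpa using PySem.Dict.getD_foldl_modify_append (l := l) (d := PySem.Dict.empty) (c := c)

-- the grouping dict's items, spelled out
theorem pvDictA_items (m : List (String × List (String × Int))) :
    ((pvPairs m).foldl (fun d p => d.modify p.1 [] (· ++ [p.2])) (PySem.Dict.empty : PySem.Dict Int (List String))).items
      = (PySem.Set.ofList ((pvPairs m).map (·.1))).map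
          (fun k => (k, ((pvPairs m).filter (fun p => p.1 == k)).map (·.2))) := by
  set D := (pvPairs m).foldl (fun d p => d.modify p.1 [] (· ++ [p.2])) (PySem.Dict.empty : PySem.Dict Int (List String)) with hD
  have hkeys : D.keys = PySem.Set.ofList ((pvPairs m).map (·.1)) := by
    rw [hD, PySem.Dict.keys_foldl_modify_key]
    rw [PySem.Dict.keys_empty, PySem.Set.update_nil_left]
  have hnd : D.keys.Nodup := by rw [hkeys]; exact PySem.Set.nodup_ofList _
  rw [PySem.Dict.items_eq_map_keys D hnd [], hkeys]
  refine List.map_congr_left (fun k hk => ?_)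
  rw [hD, pvGroupFold_getD]

-- descending strictness of a reverse-sorted Nodup list of ints
theorem pvSortedRev_pairwise_gt (S : List Int) (hS : S.Nodup) :
    (PySem.List.sorted S (fun x => x) true).Pairwise (· > ·) := by
  have hp : (PySem.List.sorted S (fun x => x) true).Pairwise (fun a b => b ≤ a) :=
    PySem.List.sorted_pairwise_rev S (fun x => x)
  have hnd : (PySem.List.sorted S (fun x => x) true).Nodup :=
    (PySem.List.sorted_perm S (fun x => x) true).nodup_iff.mpr hS
  exact (hnd.and hp).imp (fun h => lt_of_le_of_ne h.2 (fun he => h.1 he.symm))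

-- sorting key-tagged pairs by their first component = mapping over the sorted distinct keys
theorem pvSortedMap (S : List Int) (hS : S.Nodup) (F : Int → List String) :
    PySem.List.sorted (S.map (fun k => (k, F k))) (fun p => p.1) true
      = (PySem.List.sorted S (fun x => x) true).map (fun k => (k, F k)) := by
  refine PySem.List.sorted_rev_eq_of_perm_of_pairwise_gt _ _ _ ?_ ?_
  · exact (PySem.List.sorted_perm S (fun x => x) true).map _
  · rw [List.pairwise_map]
    exact (pvSortedRev_pairwise_gt S hS).imp (fun h => h)

-- ===== VERDICT (by name: the statement is the Claim_ definition above) =====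
theorem get_avgscore_spec : Claim_equal_get_avgscore := by
  intro m _ _
  show get_avgscore m = get_avgscore_alt m
  have hA : get_avgscore m
      = PySem.List.sorted ((pvPairs m).foldl (fun d p => d.modify p.1 [] (· ++ [p.2])) PySem.Dict.empty).items (fun p => p.1) true := by
    simp only [get_avgscore]
    rw [pvFoldA_eq_modify]
  have hB : get_avgscore_alt m
      = (PySem.List.sorted (PySem.Set.ofList ((pvPairs m).map (·.1))) (fun x => x) true).map
          (fun k => (k, ((pvPairs m).filter (fun p => p.1 == k)).map (·.2))) := rfl
  rw [hA, hB, pvDictA_items]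
  exact pvSortedMap _ (PySem.Set.nodup_ofList _) _
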